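-- pv_equiv track=rewrite | github.com/btguilherme/Rosalind | (wrong)Locating Restriction Sites.py | func
-- ===== SOURCE A (Python) =====
-- def func(cont, dna, reverse_compl, i):
--     if i < len(dna):
--         if dna[i] == reverse_compl[i]:
--             i += 1
--             cont += func(cont, dna, reverse_compl, i)
--             cont += 1
--             return cont
--         else:
--             return 0
--     else:
--         return cont
-- ===== SOURCE B (Python) =====
-- def func(cont, dna, reverse_compl, i):
--     n = 0
--     while i < len(dna) and dna[i] == reverse_compl[i]:
--         n += 1
--         i += 1
--     if i < len(dna):
--         return n * (cont + 1)
--     return (n + 1) * cont + n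
-- ===== Notes on version B (the rewrite author's own statement) =====
-- stated objective: alternative
-- what changed: Replaces the accumulating recursion (one stack frame per matched position, result built while unwinding) with a single while-loop that counts the matched prefix length n and then returns a closed form: n*(cont+1) on a mismatch stop, (n+1)*cont+n when the scan reaches the end of dna.
import Mathlib
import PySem

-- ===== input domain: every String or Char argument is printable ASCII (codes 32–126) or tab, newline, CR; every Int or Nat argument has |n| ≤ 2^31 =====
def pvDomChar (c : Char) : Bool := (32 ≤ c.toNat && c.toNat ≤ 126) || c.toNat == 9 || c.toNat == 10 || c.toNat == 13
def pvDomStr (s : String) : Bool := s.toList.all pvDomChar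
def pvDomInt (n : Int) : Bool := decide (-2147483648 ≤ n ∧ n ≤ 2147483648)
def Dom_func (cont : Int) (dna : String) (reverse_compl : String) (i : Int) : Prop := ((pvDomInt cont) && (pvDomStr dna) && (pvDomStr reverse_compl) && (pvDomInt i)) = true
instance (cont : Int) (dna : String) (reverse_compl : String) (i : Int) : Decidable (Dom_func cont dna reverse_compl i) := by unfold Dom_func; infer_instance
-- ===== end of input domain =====

-- B replaces A's accumulating recursion by one forward scan counting the matched
-- prefix plus a closed-form result (alternative decomposition, same cost).


-- ===== PORT A =====
def func (cont : Int) (dna : String) (reverse_compl : String) (i : Int) : Int :=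
  if i < PySem.Str.len dna then
    match PySem.Str.pyGet? dna i, PySem.Str.pyGet? reverse_compl i with
    | some a, some b =>
        if a == b then
          -- i += 1; cont += func(cont, …, i); cont += 1; return cont
          cont + func cont dna reverse_compl (i + 1) + 1
        else 0
    | _, _ => 0   -- Python raises IndexError here; excluded by Pre_func
  else cont
termination_by (PySem.Str.len dna - i).toNat
decreasing_by omega

-- ===== PORT B =====
-- the while loop: returns (n, final i)
def bLoop (dna : String) (reverse_compl : String) (n : Int) (i : Int) : Int × Int :=
  if i < PySem.Str.len dna ∧
      ((PySem.Str.pyGet? dna i).isSome ∧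
        PySem.Str.pyGet? dna i = PySem.Str.pyGet? reverse_compl i) then
    bLoop dna reverse_compl (n + 1) (i + 1)
  else (n, i)
termination_by (PySem.Str.len dna - i).toNat
decreasing_by omega

def func_alt (cont : Int) (dna : String) (reverse_compl : String) (i : Int) : Int :=
  let p := bLoop dna reverse_compl 0 i
  if p.2 < PySem.Str.len dna then p.1 * (cont + 1)
  else (p.1 + 1) * cont + p.1

-- ===== PRECONDITION & SPEC =====
-- Pre_func excludes exactly the inputs on which Python A raises IndexError:
-- some position j that the scan from i actually reaches (every earlier scanned
-- position matched) indexes dna or reverse_compl out of range.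
def Pre_func (cont : Int) (dna : String) (reverse_compl : String) (i : Int) : Prop :=
  -(PySem.Str.len dna) ≤ i ∧          -- i < -len(dna) raises at once (the ∀ below is false there too; this bound keeps it computable)
  ∀ j : Nat, j < (PySem.Str.len dna - i).toNat →
    (∀ k : Nat, k < j →
      (PySem.Str.pyGet? dna (i + k)).isSome ∧
        PySem.Str.pyGet? dna (i + k) = PySem.Str.pyGet? reverse_compl (i + k)) →
    (PySem.Str.pyGet? dna (i + j)).isSome ∧ (PySem.Str.pyGet? reverse_compl (i + j)).isSome

instance (cont : Int) (dna : String) (reverse_compl : String) (i : Int) : Decidable (Pre_func cont dna reverse_compl i) := by unfold Pre_func; infer_instance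

def pvWitness_func : Int × String × String × Int := (0, "AB", "AC", 0)

def Spec_func (cont : Int) (dna : String) (reverse_compl : String) (i : Int) (out : Int) : Prop := out = func_alt cont dna reverse_compl i
instance (cont : Int) (dna : String) (reverse_compl : String) (i : Int) (out : Int) : Decidable (Spec_func cont dna reverse_compl i out) := by unfold Spec_func; infer_instance

-- ===== CLAIM (what is proved, stated in full; the proofs are below) =====
def Claim_equal_func : Prop := ∀ (cont : Int) (dna : String) (reverse_compl : String) (i : Int), Dom_func cont dna reverse_compl i → Pre_func cont dna reverse_compl i → Spec_func cont dna reverse_compl i (func cont dna reverse_compl i)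

-- ===== LEMMAS AND PROOFS =====

lemma bLoop_step (dna reverse_compl : String) (n i : Int)
    (hc : i < PySem.Str.len dna ∧
      ((PySem.Str.pyGet? dna i).isSome ∧
        PySem.Str.pyGet? dna i = PySem.Str.pyGet? reverse_compl i)) :
    bLoop dna reverse_compl n i = bLoop dna reverse_compl (n + 1) (i + 1) := by
  rw [bLoop]; exact if_pos hc

lemma bLoop_stop (dna reverse_compl : String) (n i : Int)
    (hc : ¬ (i < PySem.Str.len dna ∧
      ((PySem.Str.pyGet? dna i).isSome ∧
        PySem.Str.pyGet? dna i = PySem.Str.pyGet? reverse_compl i))) :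
    bLoop dna reverse_compl n i = (n, i) := by
  rw [bLoop]; exact if_neg hc

-- the accumulator of bLoop only shifts the count
lemma bLoop_shift (dna reverse_compl : String) (n i : Int) :
    bLoop dna reverse_compl n i =
      ((bLoop dna reverse_compl 0 i).1 + n, (bLoop dna reverse_compl 0 i).2) := by
  generalize hm : (PySem.Str.len dna - i).toNat = m
  induction m generalizing n i with
  | zero =>
      have hc : ¬ (i < PySem.Str.len dna ∧
          ((PySem.Str.pyGet? dna i).isSome ∧
            PySem.Str.pyGet? dna i = PySem.Str.pyGet? reverse_compl i)) :=
        fun h => absurd h.1 (by omega)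
      rw [bLoop_stop dna reverse_compl n i hc, bLoop_stop dna reverse_compl 0 i hc]
      simp
  | succ m ih =>
      by_cases hc : i < PySem.Str.len dna ∧
          ((PySem.Str.pyGet? dna i).isSome ∧
            PySem.Str.pyGet? dna i = PySem.Str.pyGet? reverse_compl i)
      · have hm' : (PySem.Str.len dna - (i + 1)).toNat = m := by
          have := hc.1; omega
        rw [bLoop_step dna reverse_compl n i hc, bLoop_step dna reverse_compl 0 i hc,
          ih (n + 1) (i + 1) hm', ih (0 + 1) (i + 1) hm']
        refine Prod.ext ?_ rfl
        simp; omega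
      · rw [bLoop_stop dna reverse_compl n i hc, bLoop_stop dna reverse_compl 0 i hc]
        simp

-- Pre_func propagates one step forward after a match at position i
lemma pre_step (cont : Int) (dna reverse_compl : String) (i : Int)
    (hP : Pre_func cont dna reverse_compl i)
    (hm : (PySem.Str.pyGet? dna i).isSome ∧
      PySem.Str.pyGet? dna i = PySem.Str.pyGet? reverse_compl i) :
    Pre_func cont dna reverse_compl (i + 1) := by
  refine ⟨by have := hP.1; omega, ?_⟩
  intro j hj hpre
  have h := hP.2 (j + 1) (by omega) ?_
  · have : i + (↑(j + 1) : Int) = i + 1 + j := by push_cast; ring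
    rwa [this] at h
  · intro k hk
    match k with
    | 0 => simpa using hm
    | Nat.succ k' =>
        have h' := hpre k' (by omega)
        have : i + (↑(k' + 1) : Int) = i + 1 + k' := by push_cast; ring
        rwa [this]

lemma func_eq_alt (cont : Int) (dna reverse_compl : String) (i : Int)
    (hP : Pre_func cont dna reverse_compl i) :
    func cont dna reverse_compl i = func_alt cont dna reverse_compl i := by
  generalize hm : (PySem.Str.len dna - i).toNat = m
  induction m generalizing cont i with
  | zero =>
      have hni : ¬ i < PySem.Str.len dna := by omega
      rw [func, if_neg hni]
      simp only [func_alt]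
      rw [bLoop_stop dna reverse_compl 0 i (fun h => hni h.1)]
      rw [if_neg (show ¬ ((0 : Int), i).2 < PySem.Str.len dna from hni)]
      ring
  | succ m ih =>
      by_cases hi : i < PySem.Str.len dna
      · obtain ⟨hsd, hsr⟩ := hP.2 0 (by omega) (fun k hk => absurd hk (by omega))
        have e0 : i + ((0 : Nat) : Int) = i := by simp
        rw [e0] at hsd hsr
        obtain ⟨a, ha⟩ := Option.isSome_iff_exists.mp hsd
        obtain ⟨b, hb⟩ := Option.isSome_iff_exists.mp hsr
        by_cases hab : a = b
        · have heq : PySem.Str.pyGet? dna i = PySem.Str.pyGet? reverse_compl i := by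
            rw [ha, hb, hab]
          have hc : i < PySem.Str.len dna ∧
              ((PySem.Str.pyGet? dna i).isSome ∧
                PySem.Str.pyGet? dna i = PySem.Str.pyGet? reverse_compl i) :=
            ⟨hi, hsd, heq⟩
          have hrec := ih cont (i + 1)
            (pre_step cont dna reverse_compl i hP ⟨hsd, heq⟩) (by omega)
          rw [func, if_pos hi]
          simp only [ha, hb]
          rw [if_pos (show (a == b) = true from beq_iff_eq.mpr hab)]
          rw [hrec]
          simp only [func_alt]
          rw [bLoop_step dna reverse_compl 0 i hc,
            bLoop_shift dna reverse_compl (0 + 1) (i + 1)]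
          split_ifs with h1 <;> ring
        · have hc : ¬ (i < PySem.Str.len dna ∧
              ((PySem.Str.pyGet? dna i).isSome ∧
                PySem.Str.pyGet? dna i = PySem.Str.pyGet? reverse_compl i)) := by
            rintro ⟨-, -, heq⟩
            rw [ha, hb] at heq
            exact hab (Option.some.inj heq)
          rw [func, if_pos hi]
          simp only [ha, hb]
          rw [if_neg (show ¬ (a == b) = true by simp [hab])]
          simp only [func_alt]
          rw [bLoop_stop dna reverse_compl 0 i hc]
          rw [if_pos (show ((0 : Int), i).2 < PySem.Str.len dna from hi)]
          ring
      · rw [func, if_neg hi]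
        simp only [func_alt]
        rw [bLoop_stop dna reverse_compl 0 i (fun h => hi h.1)]
        rw [if_neg (show ¬ ((0 : Int), i).2 < PySem.Str.len dna from hi)]
        ring

-- ===== VERDICT (by name: the statement is the Claim_ definition above) =====
theorem func_spec : Claim_equal_func := by
  intro cont dna reverse_compl i _ hP
  exact func_eq_alt cont dna reverse_compl i hP
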